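-- pv_equiv track=rewrite | github.com/peotr26/nsi-premiere | Sujet_Bac/ex1_s16.py | recherche_indices_classement
-- ===== SOURCE A (Python) =====
-- def recherche_indices_classement(elt: int, tab: list) -> tuple:
--     inferieur = []
--     egale = []
--     superieur = []
--     for i in range(0, len(tab)):
--         if tab[i] == elt:
--             egale.append(i)
--         elif tab[i] < elt:
--             inferieur.append(i)
--         else:
--             superieur.append(i)
--     return inferieur, egale, superieur
-- ===== SOURCE B (Python) =====
-- def recherche_indices_classement(elt: int, tab: list) -> tuple:
--     inferieur = [i for i, v in enumerate(tab) if v < elt]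
--     egale = [i for i, v in enumerate(tab) if v == elt]
--     superieur = [i for i, v in enumerate(tab) if v > elt]
--     return inferieur, egale, superieur
-- ===== Notes on version B (the rewrite author's own statement) =====
-- stated objective: idiomatic
-- what changed: Replaces the single indexed loop with if/elif/else dispatch into three mutable accumulators by three independent enumerate-based list comprehensions, one per bucket.
import Mathlib
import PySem

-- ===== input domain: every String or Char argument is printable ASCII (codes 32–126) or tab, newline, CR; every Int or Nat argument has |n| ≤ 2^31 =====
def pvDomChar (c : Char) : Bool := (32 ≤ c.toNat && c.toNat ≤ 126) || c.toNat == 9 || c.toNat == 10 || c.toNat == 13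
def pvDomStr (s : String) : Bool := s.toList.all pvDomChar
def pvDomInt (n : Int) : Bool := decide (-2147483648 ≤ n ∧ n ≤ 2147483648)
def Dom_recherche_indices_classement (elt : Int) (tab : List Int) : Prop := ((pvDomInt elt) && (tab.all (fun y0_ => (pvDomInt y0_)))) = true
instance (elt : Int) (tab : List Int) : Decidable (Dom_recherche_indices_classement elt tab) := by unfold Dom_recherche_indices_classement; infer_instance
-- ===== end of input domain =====

-- B replaces A's single if/elif/else loop with three independent enumerate-based comprehensions, one per bucket (idiomatic).


-- ===== PORT A =====
-- for i in range(0, len(tab)) with tab[i]: the index is always in range, so pyGetD's default 0 is unreachable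
def recherche_indices_classement (elt : Int) (tab : List Int) : List Int × List Int × List Int :=
  (PySem.List.pyRange 0 tab.length 1).foldl
    (fun (st : List Int × List Int × List Int) i =>
      if PySem.List.pyGetD tab i 0 == elt then (st.1, st.2.1 ++ [i], st.2.2)
      else if PySem.List.pyGetD tab i 0 < elt then (st.1 ++ [i], st.2.1, st.2.2)
      else (st.1, st.2.1, st.2.2 ++ [i]))
    ([], [], [])

-- ===== PORT B =====
def recherche_indices_classement_alt (elt : Int) (tab : List Int) : List Int × List Int × List Int :=
  (((PySem.List.enumerate tab).filter (fun p => p.2 < elt)).map (fun p => p.1),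
   ((PySem.List.enumerate tab).filter (fun p => p.2 == elt)).map (fun p => p.1),
   ((PySem.List.enumerate tab).filter (fun p => elt < p.2)).map (fun p => p.1))

-- ===== PRECONDITION & SPEC =====
def Spec_recherche_indices_classement (elt : Int) (tab : List Int) (out : List Int × List Int × List Int) : Prop := out = recherche_indices_classement_alt elt tab
instance (elt : Int) (tab : List Int) (out : List Int × List Int × List Int) : Decidable (Spec_recherche_indices_classement elt tab out) := by unfold Spec_recherche_indices_classement; infer_instance

-- ===== CLAIM (what is proved, stated in full; the proofs are below) =====
def Claim_equal_recherche_indices_classement : Prop := ∀ (elt : Int) (tab : List Int), Dom_recherche_indices_classement elt tab → Spec_recherche_indices_classement elt tab (recherche_indices_classement elt tab)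

-- ===== LEMMAS AND PROOFS =====

-- A's fold over any index list, from any accumulators, is filters appended to the accumulators.
theorem pv_fold_char (elt : Int) (tab : List Int) (l : List Int) (a b c : List Int) :
    l.foldl
      (fun (st : List Int × List Int × List Int) i =>
        if PySem.List.pyGetD tab i 0 == elt then (st.1, st.2.1 ++ [i], st.2.2)
        else if PySem.List.pyGetD tab i 0 < elt then (st.1 ++ [i], st.2.1, st.2.2)
        else (st.1, st.2.1, st.2.2 ++ [i]))
      (a, b, c)
    = (a ++ l.filter (fun i => PySem.List.pyGetD tab i 0 < elt),
       b ++ l.filter (fun i => PySem.List.pyGetD tab i 0 == elt),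
       c ++ l.filter (fun i => elt < PySem.List.pyGetD tab i 0)) := by
  induction l generalizing a b c with
  | nil => simp
  | cons x xs ih =>
    simp only [List.foldl_cons, List.filter_cons]
    by_cases h1 : PySem.List.pyGetD tab x 0 = elt
    · have hb : (PySem.List.pyGetD tab x 0 == elt) = true := by simp [h1]
      rw [if_pos hb, ih]
      simp [h1]
    · have hb : ¬ (PySem.List.pyGetD tab x 0 == elt) = true := by simp [h1]
      by_cases h2 : PySem.List.pyGetD tab x 0 < elt
      · rw [if_neg hb, if_pos h2, ih]
        simp [h1, h2, not_lt_of_gt h2]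
      · have h3 : elt < PySem.List.pyGetD tab x 0 := lt_of_le_of_ne (not_lt.mp h2) (Ne.symm h1)
        rw [if_neg hb, if_neg h2, ih]
        simp [h1, h2, h3]

theorem pv_bucket (elt : Int) (tab : List Int) (q : Int → Int → Bool) :
    ((PySem.List.enumerate tab).filter (fun p => q p.2 elt)).map (fun p => p.1)
    = (PySem.List.pyRange 0 tab.length 1).filter (fun i => q (PySem.List.pyGetD tab i 0) elt) := by
  rw [PySem.List.enumerate_eq_map_pyRange (d := 0), List.filter_map, List.map_map]
  simp [Function.comp_def]

-- ===== VERDICT (by name: the statement is the Claim_ definition above) =====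
theorem recherche_indices_classement_spec : Claim_equal_recherche_indices_classement := by
  intro elt tab _
  unfold Spec_recherche_indices_classement recherche_indices_classement recherche_indices_classement_alt
  rw [pv_fold_char, pv_bucket elt tab (fun x e => x < e), pv_bucket elt tab (fun x e => x == e),
      pv_bucket elt tab (fun x e => e < x)]
  simp
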